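-- pv_equiv track=rewrite | github.com/ahihi102145/Python-core | Review/Chuong3_Ham/1_cnt_sum_digit.py | cnt_sum
-- ===== SOURCE A (Python) =====
-- def cnt_sum(n):
--     sum=0
--     cnt=0
--     while n>0:
--         digit=n%10
--         sum+=digit
--         cnt+=1
--         n=n//10
--     return cnt, sum
-- ===== SOURCE B (Python) =====
-- def cnt_sum(n):
--     if n <= 0:
--         return 0, 0
--     s = str(n)
--     return len(s), sum(ord(c) - ord("0") for c in s)
-- ===== Notes on version B (the rewrite author's own statement) =====
-- stated objective: idiomatic
-- what changed: Replaces the arithmetic mod/div extraction loop with a traversal of the decimal string str(n): the count is len(s) and the digit sum is a sum over the characters.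
import Mathlib
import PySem

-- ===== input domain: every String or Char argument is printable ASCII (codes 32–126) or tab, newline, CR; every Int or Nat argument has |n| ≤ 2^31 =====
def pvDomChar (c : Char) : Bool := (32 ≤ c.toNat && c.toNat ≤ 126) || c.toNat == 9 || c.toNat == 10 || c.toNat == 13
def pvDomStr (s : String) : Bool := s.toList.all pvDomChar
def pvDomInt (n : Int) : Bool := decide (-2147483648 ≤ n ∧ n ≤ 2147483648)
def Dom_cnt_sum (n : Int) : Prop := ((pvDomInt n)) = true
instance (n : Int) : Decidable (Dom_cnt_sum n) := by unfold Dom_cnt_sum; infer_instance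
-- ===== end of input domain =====

-- B replaces A's mod/div extraction loop by a traversal of the decimal string str(n) (idiomatic; same cost).


-- ===== PORT A =====
-- while n > 0: digit = n % 10; sum += digit; cnt += 1; n = n // 10
def cntSumLoop (n sum cnt : Int) : Int × Int :=
  if h : 0 < n then
    cntSumLoop (PySem.Int.floordiv n 10) (sum + PySem.Int.mod n 10) (cnt + 1)
  else (cnt, sum)
termination_by n.toNat
decreasing_by
  rw [PySem.Int.floordiv_eq_ediv_of_pos (by omega)]
  omega

def cnt_sum (n : Int) : Int × Int := cntSumLoop n 0 0

-- ===== PORT B =====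
def cnt_sum_alt (n : Int) : Int × Int :=
  if n ≤ 0 then (0, 0)
  else
    let s := PySem.Int.toChars n
    ((s.length : Int), (s.map (fun c => (c.toNat : Int) - 48)).sum)

-- ===== PRECONDITION & SPEC =====
def Spec_cnt_sum (n : Int) (out : Int × Int) : Prop := out = cnt_sum_alt n
instance (n : Int) (out : Int × Int) : Decidable (Spec_cnt_sum n out) := by unfold Spec_cnt_sum; infer_instance

-- ===== CLAIM (what is proved, stated in full; the proofs are below) =====
def Claim_equal_cnt_sum : Prop := ∀ (n : Int), Dom_cnt_sum n → Spec_cnt_sum n (cnt_sum n)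

-- ===== LEMMAS AND PROOFS =====

-- A's loop computes (count, sum) of the base-10 digits of n.toNat, offset by the accumulators.
lemma cntSumLoop_eq (n sum cnt : Int) :
    cntSumLoop n sum cnt =
      (cnt + ((Nat.digits 10 n.toNat).length : Int), sum + ((Nat.digits 10 n.toNat).sum : Int)) := by
  induction n, sum, cnt using cntSumLoop.induct with
  | case1 n sum cnt h ih =>
    rw [PySem.Int.floordiv_eq_ediv_of_pos (by norm_num), PySem.Int.mod_eq_emod_of_pos (by norm_num)] at ih
    rw [cntSumLoop, dif_pos h, PySem.Int.floordiv_eq_ediv_of_pos (by norm_num),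
      PySem.Int.mod_eq_emod_of_pos (by norm_num), ih]
    have h1 : (n / 10).toNat = n.toNat / 10 := by omega
    have h2 : n % 10 = ((n.toNat % 10 : Nat) : Int) := by omega
    rw [h1, h2, Nat.digits_def' (by norm_num : (1:Nat) < 10) (show 0 < n.toNat by omega)]
    simp only [List.length_cons, List.sum_cons, Prod.mk.injEq]
    constructor <;> push_cast <;> ring
  | case2 n sum cnt h =>
    rw [cntSumLoop, dif_neg h]
    have h0 : n.toNat = 0 := by omega
    simp [h0]

-- Nat.toDigitsCore, with enough fuel, produces the reversed digit characters.
lemma toDigitsCore_eq (f : Nat) : ∀ (n : Nat) (acc : List Char), 0 < n → n < f →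
    Nat.toDigitsCore 10 f n acc = ((Nat.digits 10 n).map Nat.digitChar).reverse ++ acc := by
  induction f with
  | zero => intro n acc h1 h2; omega
  | succ f ih =>
    intro n acc h1 h2
    simp only [Nat.toDigitsCore]
    by_cases h : n / 10 = 0
    · rw [if_pos h, Nat.digits_def' (by norm_num) h1, h]
      simp
    · rw [if_neg h, ih (n / 10) _ (Nat.pos_of_ne_zero h) (by omega),
        Nat.digits_def' (by norm_num) h1]
      simp

lemma digitChar_toNat (d : Nat) (hd : d < 10) : (Nat.digitChar d).toNat = d + 48 := by
  interval_cases d <;> decide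

-- ===== VERDICT (by name: the statement is the Claim_ definition above) =====
theorem cnt_sum_spec : Claim_equal_cnt_sum := by
  intro n _
  unfold Spec_cnt_sum cnt_sum cnt_sum_alt
  rw [cntSumLoop_eq]
  by_cases hn : n ≤ 0
  · have h0 : n.toNat = 0 := by omega
    simp [hn, h0]
  · rw [if_neg hn]
    have hm : 0 < n.toNat := by omega
    have hs : PySem.Int.toChars n = ((Nat.digits 10 n.toNat).map Nat.digitChar).reverse := by
      simp only [PySem.Int.toChars, if_neg (by omega : ¬ n < 0), Nat.toDigits]
      rw [toDigitsCore_eq (n.toNat + 1) n.toNat [] hm (by omega)]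
      simp
    have hmap : ((Nat.digits 10 n.toNat).map
        (fun d => ((Nat.digitChar d).toNat : Int) - 48)) =
        (Nat.digits 10 n.toNat).map (Nat.cast : Nat → Int) := by
      apply List.map_congr_left
      intro d hd
      rw [digitChar_toNat d (Nat.digits_lt_base (by norm_num) hd)]
      push_cast
      ring
    simp only [hs, List.length_reverse, List.length_map, List.map_reverse,
      List.sum_reverse, List.map_map, Function.comp_def, hmap, Prod.mk.injEq]
    constructor
    · ring
    · rw [← Nat.cast_list_sum]
      ring
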